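-- pv_equiv track=rewrite | github.com/lcheng89/Intro-to-AI | hw8/funny_puzzle.py | get_succ
-- ===== SOURCE A (Python) =====
-- def get_succ(state):
--     succ_states = []
--     empty_indices = [i for i, x in enumerate(state) if x == 0]
--
--     for empty_index in empty_indices:
--         row, col = divmod(empty_index, 3)
--         moves = [(-1, 0), (1, 0), (0, -1), (0, 1)]  # Up, Down, Left, Right
--
--         for dx, dy in moves:
--             new_row, new_col = row + dx, col + dy
--             if 0 <= new_row < 3 and 0 <= new_col < 3:
--                 new_index = new_row * 3 + new_col
--                 # Skip if we're trying to swap with another empty position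
--                 if state[new_index] == 0:
--                     continue
--                 new_state = list(state)  # Convert to list to ensure mutability
--                 new_state[empty_index], new_state[new_index] = new_state[new_index], new_state[empty_index]
--                 succ_states.append(new_state)
--
--     return sorted(succ_states)
-- ===== SOURCE B (Python) =====
-- # Alternative: iterate once over the 12 undirected edges of the 3x3 grid (precomputed
-- # table) and emit one swap per edge having exactly one empty endpoint, instead of
-- # scanning empties and deriving neighbours with divmod arithmetic.
-- EDGES = [(0, 1), (0, 3), (1, 2), (1, 4), (2, 5), (3, 4), (3, 6),
--          (4, 5), (4, 7), (5, 8), (6, 7), (7, 8)]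
--
--
-- def get_succ(state):
--     n = len(state)
--     succ_states = []
--     for i, j in EDGES:
--         if j < n and (state[i] == 0) != (state[j] == 0):
--             new_state = list(state)
--             new_state[i], new_state[j] = new_state[j], new_state[i]
--             succ_states.append(new_state)
--     return sorted(succ_states)
-- ===== Notes on version B (the rewrite author's own statement) =====
-- stated objective: alternative
-- what changed: Replaces the scan over empty cells with divmod-derived, bounds-checked moves by a single pass over a precomputed table of the 12 undirected edges of the 3x3 grid, emitting one swap per edge that has exactly one empty endpoint.
-- outside the precondition, e.g. on get_succ([1, 1, 1, 1, 1, 1, 1, 1, 1, 0]): A returns [[1, 1, 1, 1, 1, 1, 0, 1, 1, 1]], B returns []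
import Mathlib
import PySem

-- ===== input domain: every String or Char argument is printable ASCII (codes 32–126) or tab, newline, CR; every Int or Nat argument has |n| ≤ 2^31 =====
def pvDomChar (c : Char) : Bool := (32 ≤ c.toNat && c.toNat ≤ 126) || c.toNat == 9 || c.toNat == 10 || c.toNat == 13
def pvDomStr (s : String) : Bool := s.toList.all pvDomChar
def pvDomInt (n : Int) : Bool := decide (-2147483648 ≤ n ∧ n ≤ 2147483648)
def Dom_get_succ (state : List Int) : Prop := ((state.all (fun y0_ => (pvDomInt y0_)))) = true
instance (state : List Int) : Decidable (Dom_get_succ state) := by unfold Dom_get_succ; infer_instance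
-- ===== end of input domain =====

-- B replaces A's divmod-derived move generation from each empty cell by one pass over a
-- precomputed table of the 12 grid edges (alternative decomposition, similar cost).


-- ===== PORT A =====
-- Indices are nonnegative wherever `.toNat` is used, so it is exact; an out-of-range
-- state[new_index] is an IndexError in A (excluded by Pre_), where the port's pyGetD
-- reads the default 0 and the `continue` branch is taken.
def get_succ (state : List Int) : List (List Int) :=
  let succ_states : List (List Int) := []
  let empty_indices : List Int :=
    ((PySem.List.enumerate state 0).filter (fun p => p.2 == 0)).map (fun p => p.1)
  let succ_states := empty_indices.foldl (fun acc empty_index =>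
    let row := PySem.Int.floordiv empty_index 3
    let col := PySem.Int.mod empty_index 3
    let moves : List (Int × Int) := [(-1, 0), (1, 0), (0, -1), (0, 1)]
    moves.foldl (fun acc2 m =>
      let new_row := row + m.1
      let new_col := col + m.2
      if 0 ≤ new_row ∧ new_row < 3 ∧ 0 ≤ new_col ∧ new_col < 3 then
        let new_index := new_row * 3 + new_col
        if PySem.List.pyGetD state new_index 0 == 0 then acc2
        else
          acc2 ++ [(state.set empty_index.toNat (PySem.List.pyGetD state new_index 0)).set
                     new_index.toNat (PySem.List.pyGetD state empty_index 0)]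
      else acc2) acc) succ_states
  PySem.List.sorted succ_states (fun x => x) false

-- ===== PORT B =====
def pvEdges : List (Int × Int) :=
  [(0,1),(0,3),(1,2),(1,4),(2,5),(3,4),(3,6),(4,5),(4,7),(5,8),(6,7),(7,8)]

def get_succ_alt (state : List Int) : List (List Int) :=
  let n : Int := state.length
  let succ_states := pvEdges.foldl (fun acc e =>
    if decide (e.2 < n) && ((PySem.List.pyGetD state e.1 0 == 0) != (PySem.List.pyGetD state e.2 0 == 0)) then
      acc ++ [(state.set e.1.toNat (PySem.List.pyGetD state e.2 0)).set
                e.2.toNat (PySem.List.pyGetD state e.1 0)]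
    else acc) []
  PySem.List.sorted succ_states (fun x => x) false

-- ===== PRECONDITION & SPEC =====
-- Pre_ excludes (a) boards on which A raises IndexError (an empty cell at index ≤ 8 whose
-- down/right grid neighbour index falls beyond the end of the list) and (b) boards with an
-- empty cell at index 9–11 above a nonzero cell, where A's divmod bounds check accidentally
-- admits an 'up' move from a row below the 3×3 board the function is meant for.
def Pre_get_succ (state : List Int) : Prop :=
  ∀ i ∈ List.range state.length, state.getD i 0 = 0 →
    (i ≤ 8 → (i < 6 → i + 3 < state.length) ∧ (i % 3 ≠ 2 → i + 1 < state.length)) ∧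
    (9 ≤ i → i ≤ 11 → state.getD (i - 3) 0 = 0)
instance (state : List Int) : Decidable (Pre_get_succ state) := by unfold Pre_get_succ; infer_instance

def pvWitness_get_succ : List Int := [1, 2, 3, 4, 5, 6, 7, 8, 0]

def Spec_get_succ (state : List Int) (out : List (List Int)) : Prop := out = get_succ_alt state
instance (state : List Int) (out : List (List Int)) : Decidable (Spec_get_succ state out) := by unfold Spec_get_succ; infer_instance

-- ===== CLAIM (what is proved, stated in full; the proofs are below) =====
def Claim_equal_get_succ : Prop := ∀ (state : List Int), Dom_get_succ state → Pre_get_succ state → Spec_get_succ state (get_succ state)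
-- ===== LEMMAS AND PROOFS =====

-- the swap of positions p.1 and p.2 that both programs build
def pvSwap (s : List Int) (p : Int × Int) : List Int :=
  (s.set p.1.toNat (PySem.List.pyGetD s p.2 0)).set p.2.toNat (PySem.List.pyGetD s p.1 0)

-- the (source, target) pairs A's inner move loop admits for an empty cell e
def pvMoves (e : Int) : List (Int × Int) :=
  (if 0 ≤ PySem.Int.floordiv e 3 + -1 ∧ PySem.Int.floordiv e 3 + -1 < 3 ∧ 0 ≤ PySem.Int.mod e 3 + 0 ∧ PySem.Int.mod e 3 + 0 < 3
     then [(e, (PySem.Int.floordiv e 3 + -1) * 3 + (PySem.Int.mod e 3 + 0))] else []) ++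
  (if 0 ≤ PySem.Int.floordiv e 3 + 1 ∧ PySem.Int.floordiv e 3 + 1 < 3 ∧ 0 ≤ PySem.Int.mod e 3 + 0 ∧ PySem.Int.mod e 3 + 0 < 3
     then [(e, (PySem.Int.floordiv e 3 + 1) * 3 + (PySem.Int.mod e 3 + 0))] else []) ++
  (if 0 ≤ PySem.Int.floordiv e 3 + 0 ∧ PySem.Int.floordiv e 3 + 0 < 3 ∧ 0 ≤ PySem.Int.mod e 3 + -1 ∧ PySem.Int.mod e 3 + -1 < 3
     then [(e, (PySem.Int.floordiv e 3 + 0) * 3 + (PySem.Int.mod e 3 + -1))] else []) ++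
  (if 0 ≤ PySem.Int.floordiv e 3 + 0 ∧ PySem.Int.floordiv e 3 + 0 < 3 ∧ 0 ≤ PySem.Int.mod e 3 + 1 ∧ PySem.Int.mod e 3 + 1 < 3
     then [(e, (PySem.Int.floordiv e 3 + 0) * 3 + (PySem.Int.mod e 3 + 1))] else [])

-- A's per-move body once the empty cell is fixed
def pvG (s : List Int) (p : Int × Int) : List (List Int) :=
  if PySem.List.pyGetD s p.2 0 == 0 then [] else [pvSwap s p]

-- A's per-directed-pair contribution with the emptiness test folded in
def pvH (s : List Int) (p : Int × Int) : List (List Int) :=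
  if decide (p.1 < (s.length : Int)) && (PySem.List.pyGetD s p.1 0 == 0) && !(PySem.List.pyGetD s p.2 0 == 0)
  then [pvSwap s p] else []

-- B's per-edge contribution
def pvHB (s : List Int) (e : Int × Int) : List (List Int) :=
  if decide (e.2 < (s.length : Int)) && ((PySem.List.pyGetD s e.1 0 == 0) != (PySem.List.pyGetD s e.2 0 == 0))
  then [pvSwap s e] else []

def pvU (s : List Int) (j : Int) : List (List Int) := (pvMoves j).flatMap (pvH s)

lemma pv_flatMap_congr {α β : Type} {l : List α} {f g : α → List β}
    (h : ∀ x ∈ l, f x = g x) : l.flatMap f = l.flatMap g := by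
  simp only [List.flatMap]
  exact congrArg List.flatten (List.map_congr_left h)

lemma pv_filter_flatMap {α β : Type} (l : List α) (q : α → Bool) (f : α → List β) :
    (l.filter q).flatMap f = l.flatMap (fun x => if q x then f x else []) := by
  induction l with
  | nil => rfl
  | cons a t ih =>
    by_cases hq : q a <;> simp [hq, ih]

lemma pv_filter_map_flatMap {α β : Type} (l : List α) (q : α → Bool) (f : α → β) :
    (l.filter q).map f = l.flatMap (fun x => if q x then [f x] else []) := by
  induction l with
  | nil => rfl
  | cons a t ih =>
    by_cases hq : q a <;> simp [hq, ih]

lemma pv_ite_flatMap {β : Type} {c : Prop} [Decidable c] (x : Int × Int) (g : Int × Int → List β) :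
    (if c then [x] else []).flatMap g = if c then g x else [] := by
  split_ifs <;> simp

lemma pvGetD_in (s : List Int) (j : Int) (h0 : 0 ≤ j) :
    PySem.List.pyGetD s j 0 = s.getD j.toNat 0 := by
  simp [PySem.List.pyGetD_of_nonneg, h0, List.getD]

lemma pvGetD_out (s : List Int) (j : Int) (h0 : 0 ≤ j) (h : (s.length : Int) ≤ j) :
    PySem.List.pyGetD s j 0 = 0 := by
  rw [pvGetD_in s j h0]
  apply List.getD_eq_default
  omega

lemma pvMoves_fst {e : Int} {p : Int × Int} (hp : p ∈ pvMoves e) : p.1 = e := by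
  simp only [pvMoves, List.mem_append] at hp
  rcases hp with ((h | h) | h) | h <;> (split_ifs at h <;> simp_all)

lemma pvMoves_large {j : Int} (h : (12 : Int) ≤ j) : pvMoves j = [] := by
  have h4 : (4 : Int) ≤ PySem.Int.floordiv j 3 := by
    rw [PySem.Int.le_floordiv_iff_mul_le (by omega)]; omega
  simp only [pvMoves]
  split_ifs <;> first | rfl | (exfalso; omega)

lemma pv_sorted_perm {xs ys : List (List Int)} (h : xs.Perm ys) :
    PySem.List.sorted xs (fun x => x) false = PySem.List.sorted ys (fun x => x) false := by
  have e1 : (fun (a b : List Int) => a.decidableLT b) = (LinearOrder.toDecidableLT) := by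
    funext a b; exact Subsingleton.elim _ _
  rw [e1]
  exact PySem.List.sorted_eq_sorted_of_perm xs ys _ (fun a b hh => hh) h

-- one inner-loop step of A, factored out
lemma pv_step (s : List Int) (acc : List (List Int)) (c : Prop) [Decidable c] (e t : Int) :
    (if c then (if (PySem.List.pyGetD s t 0 == 0) = true then acc
                else acc ++ [(s.set e.toNat (PySem.List.pyGetD s t 0)).set t.toNat (PySem.List.pyGetD s e 0)])
     else acc)
    = acc ++ (if c then pvG s (e, t) else []) := by
  simp only [pvG, pvSwap]
  split_ifs <;> simp

-- A's loop nest, normalised: flatMap of pvG over the admitted moves of each empty cell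
set_option maxHeartbeats 1000000 in
lemma pvA_shape (s : List Int) :
    get_succ s = PySem.List.sorted
      ((((PySem.List.enumerate s 0).filter (fun p => p.2 == 0)).map (fun p => p.1)).flatMap
        (fun e => (pvMoves e).flatMap (pvG s)))
      (fun x => x) false := by
  have hinner : ∀ (acc : List (List Int)) (e : Int),
      List.foldl (fun acc2 (m : Int × Int) =>
        if 0 ≤ PySem.Int.floordiv e 3 + m.1 ∧ PySem.Int.floordiv e 3 + m.1 < 3 ∧
            0 ≤ PySem.Int.mod e 3 + m.2 ∧ PySem.Int.mod e 3 + m.2 < 3 then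
          if (PySem.List.pyGetD s ((PySem.Int.floordiv e 3 + m.1) * 3 + (PySem.Int.mod e 3 + m.2)) 0 == 0) = true then
            acc2
          else
            acc2 ++ [(s.set e.toNat
                (PySem.List.pyGetD s ((PySem.Int.floordiv e 3 + m.1) * 3 + (PySem.Int.mod e 3 + m.2)) 0)).set
                ((PySem.Int.floordiv e 3 + m.1) * 3 + (PySem.Int.mod e 3 + m.2)).toNat
                (PySem.List.pyGetD s e 0)]
        else acc2) acc [(-1, 0), (1, 0), (0, -1), (0, 1)]
      = acc ++ ((pvMoves e).flatMap (pvG s)) := by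
    intro acc e
    simp only [List.foldl_cons, List.foldl_nil]
    rw [pv_step, pv_step, pv_step, pv_step]
    simp only [pvMoves, List.flatMap_append, pv_ite_flatMap]
    simp [List.append_assoc]
  simp only [get_succ]
  congr 1
  have h2 : ∀ (l : List Int),
      l.flatMap (fun e => (pvMoves e).flatMap (pvG s))
        = l.foldl (fun acc e => acc ++ ((pvMoves e).flatMap (pvG s))) [] :=
    fun l => ((PySem.List.foldl_append_eq_flatMap _ _ _).trans (List.nil_append _)).symm
  rw [h2]
  first
  | exact PySem.List.foldl_congr_mem' _ (fun e _ acc => hinner acc e)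
  | exact PySem.List.foldl_congr_mem' (h := fun e hmem acc => hinner acc e)
  | (apply PySem.List.foldl_congr_mem'; intro e hmem acc; exact hinner acc e)

-- B's loop, normalised
lemma pvB_shape (s : List Int) :
    get_succ_alt s = PySem.List.sorted (pvEdges.flatMap (pvHB s)) (fun x => x) false := by
  simp only [get_succ_alt]
  congr 1
  rw [PySem.List.foldl_append_if]
  rw [List.nil_append, pv_filter_map_flatMap]
  exact pv_flatMap_congr (fun e _ => by simp only [pvHB, pvSwap])

-- per-edge agreement of the two traversals
lemma pv_edge (s : List Int) (i j : Int) (h0 : 0 ≤ i) (hij : i < j) :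
    pvH s (i, j) ++ pvH s (j, i) = pvHB s (i, j) := by
  simp only [pvH, pvHB]
  by_cases hj : j < (s.length : Int)
  · have hi : i < (s.length : Int) := lt_trans hij hj
    have hne : j.toNat ≠ i.toNat := by omega
    have hswap : pvSwap s (j, i) = pvSwap s (i, j) := by
      simp only [pvSwap]
      first
      | exact List.set_comm _ _ _ hne
      | exact List.set_comm _ _ hne _
      | exact List.set_comm hne
      | (apply List.set_comm; omega)
    by_cases ha : PySem.List.pyGetD s i 0 = 0 <;>
      by_cases hb : PySem.List.pyGetD s j 0 = 0
    · simp [ha, hb]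
    · simp [ha, hb, hi, hj]
    · simp [ha, hb, hi, hj, hswap]
    · simp [ha, hb]
  · have hb : PySem.List.pyGetD s j 0 = 0 := pvGetD_out s j (by omega) (by omega)
    simp [hj, hb]

-- the two concrete traversal orders are permutations of one another
lemma pv_perm_tables :
    ((PySem.List.pyRange 0 9 1).flatMap pvMoves).Perm
      (pvEdges.flatMap (fun e => [e, (e.2, e.1)])) := by decide

theorem get_succ_spec : Claim_equal_get_succ := by
  unfold Claim_equal_get_succ
  intro s _ hpre
  unfold Spec_get_succ
  rw [pvA_shape, pvB_shape]
  apply pv_sorted_perm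
  -- the list of empty indices is a filtered range
  have hemp : (((PySem.List.enumerate s 0).filter (fun p => p.2 == 0)).map (fun p => p.1))
      = (PySem.List.pyRange 0 (s.length : Int) 1).filter (fun j => PySem.List.pyGetD s j 0 == 0) := by
    rw [PySem.List.enumerate_eq_map_pyRange (d := 0)]
    rw [List.filter_map, List.map_map]
    simp [Function.comp_def, PySem.List.len_eq]
  rw [hemp, pv_filter_flatMap]
  -- on the range, the guarded contribution is pvU
  have hcong : ((PySem.List.pyRange 0 (s.length : Int) 1).flatMap
      (fun j => if PySem.List.pyGetD s j 0 == 0 then (pvMoves j).flatMap (pvG s) else []))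
      = (PySem.List.pyRange 0 (s.length : Int) 1).flatMap (pvU s) := by
    apply pv_flatMap_congr
    intro j hjmem
    rw [PySem.List.mem_pyRange_one] at hjmem
    obtain ⟨hj0, hjN⟩ := hjmem
    by_cases hz : PySem.List.pyGetD s j 0 = 0
    · simp only [hz, beq_self_eq_true, if_true, pvU]
      apply pv_flatMap_congr
      intro p hp
      have hfst := pvMoves_fst hp
      simp [pvG, pvH, hfst, hz, hjN]
    · simp only [pvU]
      rw [if_neg (by simp [hz])]
      symm
      rw [List.flatMap_eq_nil_iff]
      intro p hp
      have hfst := pvMoves_fst hp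
      simp [pvH, hfst, hz]
  rw [hcong]
  -- shrink/extend the range to [0, 9): beyond 9 nothing contributes on Pre_
  have hvanish : ∀ j : Int, 9 ≤ j → pvU s j = [] := by
    intro j hj9
    by_cases h12 : (12 : Int) ≤ j
    · simp [pvU, pvMoves_large h12]
    · rw [pvU, List.flatMap_eq_nil_iff]
      intro p hp
      have hfst := pvMoves_fst hp
      have hrow : PySem.Int.floordiv j 3 = 3 := by
        rw [PySem.Int.floordiv_eq_iff_of_pos (by omega)]; omega
      have htgt : p.2 = j - 3 := by
        have hdm := PySem.Int.floordiv_mul_add_mod j 3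
        have hm3 : PySem.Int.mod j 3 < 3 := PySem.Int.mod_lt _ (by omega)
        have hm0 : (0:Int) ≤ PySem.Int.mod j 3 := PySem.Int.mod_nonneg _ (by omega)
        simp only [pvMoves, List.mem_append] at hp
        rcases hp with ((h | h) | h) | h <;> split_ifs at h <;> simp_all <;> try omega
      simp only [pvH, hfst, htgt]
      by_cases hjN : j < (s.length : Int)
      · by_cases hz : PySem.List.pyGetD s j 0 = 0
        · have hz' : s.getD j.toNat 0 = 0 := by rw [← pvGetD_in s j (by omega)]; exact hz
          have hlen : j.toNat < s.length := by omega
          have habove := (hpre j.toNat (List.mem_range.mpr hlen) hz').2 (by omega) (by omega)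
          have hup0 : PySem.List.pyGetD s (j - 3) 0 = 0 := by
            rw [pvGetD_in s (j - 3) (by omega)]
            have he : (j - 3).toNat = j.toNat - 3 := by omega
            rw [he]; exact habove
          simp [hup0]
        · simp [hz]
      · simp [hjN]
  have hrange : (PySem.List.pyRange 0 (s.length : Int) 1).flatMap (pvU s)
      = (PySem.List.pyRange 0 9 1).flatMap (pvU s) := by
    rcases le_total (s.length : Int) 9 with hN | hN
    · rw [PySem.List.pyRange_one_append 0 (s.length : Int) 9 (by omega) hN, List.flatMap_append]
      have htail : (PySem.List.pyRange (s.length : Int) 9 1).flatMap (pvU s) = [] := by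
        rw [List.flatMap_eq_nil_iff]
        intro j hj
        rw [PySem.List.mem_pyRange_one] at hj
        rw [pvU, List.flatMap_eq_nil_iff]
        intro p hp
        have hfst := pvMoves_fst hp
        have hout : ¬ (p.1 < (s.length : Int)) := by omega
        simp [pvH, hout]
      rw [htail, List.append_nil]
    · rw [PySem.List.pyRange_one_append 0 9 (s.length : Int) (by omega) hN, List.flatMap_append]
      have htail : (PySem.List.pyRange 9 (s.length : Int) 1).flatMap (pvU s) = [] := by
        rw [List.flatMap_eq_nil_iff]
        intro j hj
        rw [PySem.List.mem_pyRange_one] at hj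
        exact hvanish j hj.1
      rw [htail, List.append_nil]
  rw [hrange]
  -- regroup the directed pairs by undirected edges
  have hassoc : (PySem.List.pyRange 0 9 1).flatMap (pvU s)
      = ((PySem.List.pyRange 0 9 1).flatMap pvMoves).flatMap (pvH s) := by
    rw [List.flatMap_assoc]
    rfl
  rw [hassoc]
  refine (pv_perm_tables.flatMap_right (pvH s)).trans ?_
  have hregroup : (pvEdges.flatMap (fun e => [e, (e.2, e.1)])).flatMap (pvH s)
      = pvEdges.flatMap (fun e => pvH s e ++ pvH s (e.2, e.1)) := by
    rw [List.flatMap_assoc]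
    exact pv_flatMap_congr (fun e _ => by simp)
  rw [hregroup]
  have hfinal : pvEdges.flatMap (fun e => pvH s e ++ pvH s (e.2, e.1))
      = pvEdges.flatMap (pvHB s) := by
    apply pv_flatMap_congr
    intro e he
    fin_cases he <;> exact pv_edge s _ _ (by norm_num) (by norm_num)
  rw [hfinal]
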